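-- pv_equiv track=rewrite | github.com/KssK111/Matura | 2019-05/liczby.py | najdluzszy_ciag_z_ciagu
-- ===== SOURCE A (Python) =====
-- from math import gcd
--
-- def najdluzszy_ciag_z_ciagu(ciag: list[int]) -> tuple[int, int, int]:
--     nwd = ciag[0]
--     dlugosc = 1
--     for liczba in ciag[1:]:
--         if gcd(nwd, liczba) == 1:
--             break
--         nwd = gcd(nwd, liczba)
--         dlugosc += 1
--     return (ciag[0], dlugosc, nwd)
-- ===== SOURCE B (Python) =====
-- from math import gcd
--
-- def najdluzszy_ciag_z_ciagu(ciag: list[int]) -> tuple[int, int, int]: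
--     # Pass 1: table of prefix gcds; Pass 2: find the first breakpoint.
--     running = [ciag[0]]
--     for x in ciag[1:]:
--         running.append(gcd(running[-1], x))
--     j = len(running)
--     for k in range(1, len(running)):
--         if running[k] == 1:
--             j = k
--             break
--     return (ciag[0], j, running[j - 1])
-- ===== Notes on version B (the rewrite author's own statement) =====
-- stated objective: alternative
-- what changed: B first builds the full prefix-gcd table, then separately searches it for the first entry equal to 1 to read off length and gcd, instead of A's single fused loop with an early break carrying (nwd, dlugosc) state.
import Mathlib
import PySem

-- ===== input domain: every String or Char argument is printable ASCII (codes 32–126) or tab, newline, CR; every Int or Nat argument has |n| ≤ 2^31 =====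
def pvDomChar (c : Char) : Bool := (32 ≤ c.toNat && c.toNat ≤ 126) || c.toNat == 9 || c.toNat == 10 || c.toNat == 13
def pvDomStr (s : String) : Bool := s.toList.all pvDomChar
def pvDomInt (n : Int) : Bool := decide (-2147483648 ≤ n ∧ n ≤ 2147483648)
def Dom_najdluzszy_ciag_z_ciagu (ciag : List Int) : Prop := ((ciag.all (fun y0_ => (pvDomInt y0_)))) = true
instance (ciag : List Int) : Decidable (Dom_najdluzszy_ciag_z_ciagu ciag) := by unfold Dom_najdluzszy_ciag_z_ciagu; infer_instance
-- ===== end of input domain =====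

-- B builds the full prefix-gcd table and then searches it for the first 1, instead of A's fused early-break loop (alternative decomposition, same cost).
-- Pre_ excludes the empty list, on which both Pythons raise IndexError at ciag[0].


-- ===== PORT A =====
-- math.gcd on ints (Python returns the nonnegative gcd of the absolute values, as Int.gcd does)
def pyGcd (a b : Int) : Int := Int.gcd a b

-- the 'for liczba in ciag[1:]' loop with its early break, carrying (nwd, dlugosc)
def pvALoop (nwd dl : Int) : List Int → Int × Int
  | [] => (nwd, dl)
  | x :: xs => if pyGcd nwd x = 1 then (nwd, dl) else pvALoop (pyGcd nwd x) (dl + 1) xs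

def najdluzszy_ciag_z_ciagu (ciag : List Int) : Int × Int × Int :=
  let h := (PySem.List.pyGet? ciag 0).getD 0   -- ciag[0]; empty list excluded by Pre_
  let r := pvALoop h 1 (PySem.List.slice ciag (some 1) none)
  (h, r.2, r.1)

-- ===== PORT B =====
-- pass 1: the appended tail of 'running' (running = ciag[0] :: this)
def pvScan (prev : Int) : List Int → List Int
  | [] => []
  | x :: xs => pyGcd prev x :: pvScan (pyGcd prev x) xs

-- pass 2: 'for k in range(1, len(running)): if running[k] == 1: j = k; break', fed running[1:]
def pvFindOne (k : Int) : List Int → Option Int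
  | [] => none
  | g :: gs => if g = 1 then some k else pvFindOne (k + 1) gs

def najdluzszy_ciag_z_ciagu_alt (ciag : List Int) : Int × Int × Int :=
  let h := (PySem.List.pyGet? ciag 0).getD 0   -- ciag[0]; empty list excluded by Pre_
  let running := h :: pvScan h (PySem.List.slice ciag (some 1) none)
  let j := (pvFindOne 1 running.tail).getD (running.length : Int)
  (h, j, (PySem.List.pyGet? running (j - 1)).getD 0)

-- ===== PRECONDITION & SPEC =====
-- Pre_: both A and B index ciag[0], so the empty list raises IndexError in both.
def Pre_najdluzszy_ciag_z_ciagu (ciag : List Int) : Prop := ciag ≠ []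
instance (ciag : List Int) : Decidable (Pre_najdluzszy_ciag_z_ciagu ciag) := by unfold Pre_najdluzszy_ciag_z_ciagu; infer_instance
def pvWitness_najdluzszy_ciag_z_ciagu : List Int := [6, 4, 2, 7]

def Spec_najdluzszy_ciag_z_ciagu (ciag : List Int) (out : Int × Int × Int) : Prop := out = najdluzszy_ciag_z_ciagu_alt ciag
instance (ciag : List Int) (out : Int × Int × Int) : Decidable (Spec_najdluzszy_ciag_z_ciagu ciag out) := by unfold Spec_najdluzszy_ciag_z_ciagu; infer_instance

-- ===== CLAIM (what is proved, stated in full; the proofs are below) =====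
def Claim_equal_najdluzszy_ciag_z_ciagu : Prop := ∀ (ciag : List Int), Dom_najdluzszy_ciag_z_ciagu ciag → Pre_najdluzszy_ciag_z_ciagu ciag → Spec_najdluzszy_ciag_z_ciagu ciag (najdluzszy_ciag_z_ciagu ciag)

-- ===== LEMMAS AND PROOFS =====

-- first index of 1 in a list, or its length if absent
def pvFi : List Int → Nat
  | [] => 0
  | g :: gs => if g = 1 then 0 else 1 + pvFi gs

theorem pvFi_le (t : List Int) : pvFi t ≤ t.length := by
  induction t with
  | nil => simp [pvFi]
  | cons g gs ih => simp only [pvFi, List.length_cons]; split <;> omega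

theorem pvFindOne_eq (t : List Int) : ∀ k : Int,
    pvFindOne k t = if pvFi t = t.length then none else some (k + (pvFi t : Int)) := by
  induction t with
  | nil => intro k; simp [pvFindOne, pvFi]
  | cons g gs ih =>
    intro k
    simp only [pvFindOne, pvFi, List.length_cons]
    by_cases h : g = 1
    · simp [h]
    · have hle := pvFi_le gs
      rw [if_neg h, if_neg h, ih (k + 1)]
      by_cases h2 : pvFi gs = gs.length
      · rw [if_pos h2, if_pos (show 1 + pvFi gs = gs.length + 1 by omega)]
      · have : ¬ (1 + pvFi gs = gs.length + 1) := by omega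
        simp only [if_neg h2, if_neg this, Option.some.injEq]
        push_cast; ring

theorem pvALoop_eq (xs : List Int) : ∀ nwd dl : Int,
    pvALoop nwd dl xs =
      ((nwd :: pvScan nwd xs).getD (pvFi (pvScan nwd xs)) 0, dl + (pvFi (pvScan nwd xs) : Int)) := by
  induction xs with
  | nil => intro nwd dl; simp [pvALoop, pvScan, pvFi]
  | cons x xs ih =>
    intro nwd dl
    simp only [pvALoop, pvScan, pvFi]
    by_cases h : pyGcd nwd x = 1
    · simp [h]
    · rw [if_neg h, if_neg h, ih (pyGcd nwd x) (dl + 1)]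
      have : (nwd :: pyGcd nwd x :: pvScan (pyGcd nwd x) xs).getD (1 + pvFi (pvScan (pyGcd nwd x) xs)) 0
           = (pyGcd nwd x :: pvScan (pyGcd nwd x) xs).getD (pvFi (pvScan (pyGcd nwd x) xs)) 0 := by
        rw [Nat.add_comm]; rfl
      rw [this]
      refine Prod.ext rfl ?_
      simp only
      push_cast; ring

theorem pvCore (h0 : Int) (tl : List Int) :
    (h0, (pvALoop h0 1 tl).2, (pvALoop h0 1 tl).1) =
    (h0,
     (pvFindOne 1 (h0 :: pvScan h0 tl).tail).getD (((h0 :: pvScan h0 tl).length : Nat) : Int),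
     (PySem.List.pyGet? (h0 :: pvScan h0 tl)
        ((pvFindOne 1 (h0 :: pvScan h0 tl).tail).getD (((h0 :: pvScan h0 tl).length : Nat) : Int) - 1)).getD 0) := by
  have htail : (h0 :: pvScan h0 tl).tail = pvScan h0 tl := rfl
  rw [htail]
  have hle := pvFi_le (pvScan h0 tl)
  have hj : (pvFindOne 1 (pvScan h0 tl)).getD (((h0 :: pvScan h0 tl).length : Nat) : Int)
      = 1 + (pvFi (pvScan h0 tl) : Int) := by
    rw [pvFindOne_eq]
    split
    · rename_i h2
      simp only [Option.getD_none, List.length_cons, h2]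
      push_cast; ring
    · simp
  rw [hj, pvALoop_eq]
  have harith : (1 : Int) + (pvFi (pvScan h0 tl) : Int) - 1 = ((pvFi (pvScan h0 tl) : Nat) : Int) := by
    ring
  rw [harith, PySem.List.pyGet?_natCast]
  have hin : pvFi (pvScan h0 tl) < (h0 :: pvScan h0 tl).length := by
    simp only [List.length_cons]; omega
  rw [List.getElem?_eq_getElem hin]
  simp only [Option.getD_some]
  rw [List.getD_eq_getElem _ _ hin]

-- ===== VERDICT (by name: the statement is the Claim_ definition above) =====
theorem najdluzszy_ciag_z_ciagu_spec : Claim_equal_najdluzszy_ciag_z_ciagu := by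
  intro ciag _ _
  unfold Spec_najdluzszy_ciag_z_ciagu najdluzszy_ciag_z_ciagu najdluzszy_ciag_z_ciagu_alt
  exact pvCore ((PySem.List.pyGet? ciag 0).getD 0) (PySem.List.slice ciag (some 1) none)
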